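-- pv_equiv track=rewrite | github.com/otkrickey/tvu | src/tvu/decimal/power/int_power.py | int_power
-- ===== SOURCE A (Python) =====
-- def int_power(x: int) -> tuple[int, int]:
--     """Calculates the power of an integer.
--
--     Parameters
--     ----------
--     x : int
--         The integer to be calculated.
--
--     Returns
--     -------
--     tuple[int, int]
--         The power of the integer.
--
--     """
--     if x == 0:
--         return (0, 0)
--     e = 0
--     while x % 10 == 0:
--         x //= 10
--         e += 1
--     return (x, e)
-- ===== SOURCE B (Python) =====
-- def int_power(x: int) -> tuple[int, int]:
--     """Strip trailing decimal zeros of x; return (reduced int, count).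
--
--     Counts trailing zeros by exponential search plus binary decomposition
--     of the exponent instead of dividing by 10 one digit at a time.
--     """
--     if x == 0:
--         return (0, 0)
--     k = 1
--     while x % 10 ** (2 * k) == 0:
--         k *= 2
--     e = 0
--     while k:
--         p = 10 ** k
--         if x % p == 0:
--             x //= p
--             e += k
--         k //= 2
--     return (x, e)
-- ===== Notes on version B (the rewrite author's own statement) =====
-- stated objective: alternative
-- what changed: B counts the trailing decimal zeros by exponential search for an upper bound followed by greedy binary decomposition of the exponent, dividing by large powers of ten, instead of A's loop that divides by ten once per zero.
import Mathlib
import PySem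

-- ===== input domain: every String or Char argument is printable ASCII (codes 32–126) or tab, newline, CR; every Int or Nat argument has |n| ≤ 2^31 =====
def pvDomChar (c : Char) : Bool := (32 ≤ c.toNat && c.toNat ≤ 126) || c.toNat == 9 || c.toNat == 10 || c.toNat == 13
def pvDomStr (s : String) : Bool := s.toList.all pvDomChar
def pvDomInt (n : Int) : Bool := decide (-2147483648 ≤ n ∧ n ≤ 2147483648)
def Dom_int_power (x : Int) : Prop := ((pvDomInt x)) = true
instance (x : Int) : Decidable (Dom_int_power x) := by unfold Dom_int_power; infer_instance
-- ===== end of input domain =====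

-- B strips trailing zeros with O(log e) power-of-two divisions (exponential search
-- then binary decomposition of the exponent) instead of A's one-digit-at-a-time loop;
-- objective: alternative algorithm (not measurably faster at the tested sizes).

-- ===== PORT A =====
-- 'while x % 10 == 0: x //= 10; e += 1'. The fuel argument is a totality guard only:
-- int_power passes fuel = |x|, and the loop runs at most log10 |x| < |x| times.
def intPowerLoopA : Nat → Int → Int → Int × Int
  | 0, x, e => (x, e)
  | fuel + 1, x, e =>
    if PySem.Int.mod x 10 = 0 then
      intPowerLoopA fuel (PySem.Int.floordiv x 10) (e + 1)
    else (x, e)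

def int_power (x : Int) : Int × Int :=
  if x = 0 then (0, 0) else intPowerLoopA x.natAbs x 0

-- ===== PORT B =====
-- 'while x % 10 ** (2 * k) == 0: k *= 2'. The fuel argument is a totality guard only:
-- int_power_alt passes fuel = |x|, and the loop runs at most log2 log10 |x| times.
def intPowerGrow : Nat → Int → Int → Int
  | 0, _, k => k
  | fuel + 1, x, k =>
    if PySem.Int.mod x (10 ^ (2 * k).toNat) = 0 then
      intPowerGrow fuel x (2 * k)
    else k

-- 'while k: p = 10 ** k; if x % p == 0: x //= p; e += k; k //= 2'. The fuel argument
-- is a totality guard only: int_power_alt passes fuel = |x| + 1, enough for k to reach 0.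
def intPowerShrink : Nat → Int → Int → Int → Int × Int
  | 0, x, _, e => (x, e)
  | fuel + 1, x, k, e =>
    if 1 ≤ k then
      let p : Int := 10 ^ k.toNat
      if PySem.Int.mod x p = 0 then
        intPowerShrink fuel (PySem.Int.floordiv x p) (PySem.Int.floordiv k 2) (e + k)
      else
        intPowerShrink fuel x (PySem.Int.floordiv k 2) e
    else (x, e)

def int_power_alt (x : Int) : Int × Int :=
  if x = 0 then (0, 0)
  else intPowerShrink (x.natAbs + 1) x (intPowerGrow x.natAbs x 1) 0

-- ===== PRECONDITION & SPEC =====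
def Spec_int_power (x : Int) (out : Int × Int) : Prop := out = int_power_alt x
instance (x : Int) (out : Int × Int) : Decidable (Spec_int_power x out) := by unfold Spec_int_power; infer_instance

-- ===== CLAIM (what is proved, stated in full; the proofs are below) =====
def Claim_equal_int_power : Prop := ∀ (x : Int), Dom_int_power x → Spec_int_power x (int_power x)

-- ===== LEMMAS AND PROOFS =====

-- 10^k divides y·10^t exactly when k ≤ t, given 10 ∤ y.
lemma pow_dvd_iff (y : Int) (t k : Nat) (hy : ¬ (10 : Int) ∣ y) :
    (10 : Int) ^ k ∣ y * 10 ^ t ↔ k ≤ t := by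
  constructor
  · intro hdvd
    by_contra hlt
    rw [not_le] at hlt
    obtain ⟨s, rfl⟩ : ∃ s, k = t + (s + 1) := ⟨k - t - 1, by omega⟩
    rw [pow_add, mul_comm y] at hdvd
    have := (mul_dvd_mul_iff_left (a := (10 : Int) ^ t) (by positivity)).mp hdvd
    exact hy (dvd_trans (dvd_pow_self 10 (Nat.succ_ne_zero s)) this)
  · intro hle
    exact Dvd.dvd.mul_left (pow_dvd_pow 10 hle) y

-- Every nonzero integer is y·10^t with 10 ∤ y, and 10^t ≤ |x| bounds the exponent.
lemma exists_canonical : ∀ (x : Int), x ≠ 0 →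
    ∃ (y : Int) (t : Nat), x = y * 10 ^ t ∧ ¬ (10 : Int) ∣ y ∧ y ≠ 0 ∧ 10 ^ t ≤ x.natAbs := by
  intro x
  induction hn : x.natAbs using Nat.strong_induction_on generalizing x with
  | _ n ih =>
  intro hx
  by_cases hd : (10 : Int) ∣ x
  · obtain ⟨m, rfl⟩ := hd
    have hm0 : m ≠ 0 := by rintro rfl; simp at hx
    have h10 : ((10 : Int) * m).natAbs = 10 * m.natAbs := by simp [Int.natAbs_mul]
    have hlt : m.natAbs < n := by omega
    obtain ⟨y, t, hxe, hy, hy0, hb⟩ := ih m.natAbs hlt m rfl hm0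
    refine ⟨y, t + 1, by rw [hxe]; ring, hy, hy0, ?_⟩
    rw [pow_succ]
    omega
  · exact ⟨x, 0, by ring, hd, hx, by simp; omega⟩

-- A's loop strips exactly the t trailing zeros when given enough fuel.
lemma loopA_spec (y : Int) (hy : ¬ (10 : Int) ∣ y) :
    ∀ (fuel t : Nat) (e : Int), t < fuel →
      intPowerLoopA fuel (y * 10 ^ t) e = (y, e + t) := by
  intro fuel
  induction fuel with
  | zero => omega
  | succ f ihf =>
    intro t e ht
    match t with
    | 0 =>
      rw [intPowerLoopA, if_neg (by
        intro hc
        rw [pow_zero, mul_one, PySem.Int.mod_eq_zero_iff_dvd] at hc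
        exact hy hc)]
      simp
    | s + 1 =>
      rw [intPowerLoopA, if_pos (by
          rw [PySem.Int.mod_eq_zero_iff_dvd]
          have h1 := (pow_dvd_iff y (s + 1) 1 hy).mpr (by omega)
          simpa using h1)]
      rw [PySem.Int.floordiv_eq_ediv_of_pos (by norm_num),
        show y * (10 : Int) ^ (s + 1) = (y * 10 ^ s) * 10 by ring,
        Int.mul_ediv_cancel _ (by norm_num), ihf s (e + 1) (by omega)]
      simp only [Prod.mk.injEq, true_and]
      push_cast
      ring

-- ((2:Int)^j).toNat = 2^j
lemma toNat_two_pow (j : Nat) : ((2 : Int) ^ j).toNat = 2 ^ j := by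
  rw [show ((2 : Int) ^ j) = ((2 ^ j : Nat) : Int) by push_cast; ring, Int.toNat_natCast]

-- B's doubling loop returns a power of two exceeding half the trailing-zero count.
lemma grow_spec (y : Int) (t : Nat) (hy : ¬ (10 : Int) ∣ y) :
    ∀ (fuel j : Nat), t + 1 ≤ fuel + 2 ^ j →
      ∃ j' : Nat, intPowerGrow fuel (y * 10 ^ t) ((2 : Int) ^ j) = 2 ^ j' ∧
        t < 2 * 2 ^ j' ∧ j' ≤ j + fuel := by
  intro fuel
  induction fuel with
  | zero =>
    intro j hj
    exact ⟨j, rfl, by omega, by omega⟩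
  | succ f ihf =>
    intro j hj
    have hkey : PySem.Int.mod (y * 10 ^ t) (10 ^ (2 * (2 : Int) ^ j).toNat) = 0 ↔ 2 ^ (j + 1) ≤ t := by
      rw [PySem.Int.mod_eq_zero_iff_dvd,
        show (2 * (2 : Int) ^ j).toNat = 2 ^ (j + 1) by rw [← toNat_two_pow (j + 1)]; ring_nf,
        pow_dvd_iff y t _ hy]
    rw [intPowerGrow]
    by_cases hd : 2 ^ (j + 1) ≤ t
    · rw [if_pos (hkey.mpr hd), show (2 * (2 : Int) ^ j) = (2 : Int) ^ (j + 1) by ring]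
      obtain ⟨j', h1, h2, h3⟩ := ihf (j + 1) (by
        have : 2 ^ j + 1 ≤ 2 ^ (j + 1) := by
          have := Nat.pow_lt_pow_right (a := 2) (by norm_num) (Nat.lt_succ_self j)
          omega
        omega)
      exact ⟨j', h1, h2, by omega⟩
    · rw [if_neg (by rw [hkey]; exact hd)]
      refine ⟨j, rfl, ?_, by omega⟩
      have h2 : 2 * 2 ^ j = 2 ^ (j + 1) := by ring
      omega

-- With k = 0 the halving loop stops at once, whatever the fuel.
lemma shrink_zero (fuel : Nat) (x e : Int) : intPowerShrink fuel x 0 e = (x, e) := by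
  cases fuel with
  | zero => rfl
  | succ f => rw [intPowerShrink, if_neg (by norm_num)]

-- B's halving loop removes exactly the t trailing zeros when t < 2·2^j.
lemma shrink_spec (y : Int) (hy : ¬ (10 : Int) ∣ y) :
    ∀ (j : Nat) (fuel : Nat) (t : Nat) (e : Int), t < 2 * 2 ^ j → j + 1 ≤ fuel →
      intPowerShrink fuel (y * 10 ^ t) ((2 : Int) ^ j) e = (y, e + t) := by
  intro j
  induction j with
  | zero =>
    intro fuel t e ht hf
    obtain ⟨f, rfl⟩ : ∃ f, fuel = f + 1 := ⟨fuel - 1, by omega⟩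
    have hmody : PySem.Int.mod y 10 ≠ 0 := by
      intro hc
      rw [PySem.Int.mod_eq_zero_iff_dvd] at hc
      exact hy hc
    have hk0 : PySem.Int.floordiv (1 : Int) 2 = 0 := by decide
    rw [intPowerShrink]
    interval_cases t
    · -- t = 0
      rw [if_pos (by norm_num)]
      simp only [pow_zero, mul_one, Int.toNat_one, pow_one]
      rw [if_neg hmody, hk0, shrink_zero]
      simp
    · -- t = 1
      rw [if_pos (by norm_num)]
      simp only [pow_zero, pow_one, Int.toNat_one]
      rw [if_pos (by rw [PySem.Int.mod_eq_zero_iff_dvd]; exact ⟨y, by ring⟩),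
        PySem.Int.floordiv_eq_ediv_of_pos (by norm_num),
        Int.mul_ediv_cancel _ (by norm_num), hk0, shrink_zero]
      simp
  | succ j ih =>
    intro fuel t e ht hf
    obtain ⟨f, rfl⟩ : ∃ f, fuel = f + 1 := ⟨fuel - 1, by omega⟩
    have h2 : 2 ^ (j + 1) = 2 * 2 ^ j := by ring
    rw [intPowerShrink, if_pos (one_le_pow₀ (by norm_num : (1 : Int) ≤ 2))]
    simp only [toNat_two_pow]
    have hhalf : PySem.Int.floordiv ((2 : Int) ^ (j + 1)) 2 = 2 ^ j := by
      rw [PySem.Int.floordiv_eq_ediv_of_pos (by norm_num), pow_succ,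
        Int.mul_ediv_cancel _ (by norm_num)]
    by_cases hd : 2 ^ (j + 1) ≤ t
    · rw [if_pos (by rw [PySem.Int.mod_eq_zero_iff_dvd, pow_dvd_iff y t _ hy]; exact hd),
        PySem.Int.floordiv_eq_ediv_of_pos (by positivity), hhalf]
      have hsplit : y * (10 : Int) ^ t = (y * 10 ^ (t - 2 ^ (j + 1))) * 10 ^ (2 ^ (j + 1)) := by
        rw [mul_assoc, ← pow_add]
        congr 2
        omega
      rw [hsplit, Int.mul_ediv_cancel _ (by positivity),
        ih f (t - 2 ^ (j + 1)) (e + 2 ^ (j + 1)) (by omega) (by omega)]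
      simp only [Prod.mk.injEq, true_and]
      rw [Nat.cast_sub hd]
      push_cast
      ring
    · rw [if_neg (by rw [PySem.Int.mod_eq_zero_iff_dvd, pow_dvd_iff y t _ hy]; omega), hhalf]
      exact ih f t e (by omega) (by omega)

-- ===== VERDICT (by name: the statement is the Claim_ definition above) =====
theorem int_power_spec : Claim_equal_int_power := by
  intro x _
  unfold Spec_int_power int_power int_power_alt
  by_cases hx : x = 0
  · simp [hx]
  · rw [if_neg hx, if_neg hx]
    obtain ⟨y, t, hxe, hy, hy0, hb⟩ := exists_canonical x hx
    have htn : t < x.natAbs := by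
      have := Nat.lt_pow_self (n := t) (a := 10) (by norm_num)
      omega
    obtain ⟨n, hn⟩ : ∃ n, x.natAbs = n := ⟨x.natAbs, rfl⟩
    rw [hn] at htn
    obtain ⟨j', hgrow, hlt, hj'⟩ := grow_spec y t hy n 0 (by omega)
    rw [show ((2 : Int) ^ 0) = 1 from pow_zero 2] at hgrow
    rw [hn, hxe, hgrow, loopA_spec y hy n t 0 htn,
      shrink_spec y hy j' (n + 1) t 0 hlt (by omega)]
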